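-- pv_equiv track=rewrite | github.com/fwillemen/openOrbit | scripts/fleet-viz.py | hstack
-- ===== SOURCE A (Python) =====
-- def hstack(panels: list[list[str]], sep: str = " ") -> list[str]:
--     """Horizontally stack equal-height panels."""
--     height = max(len(p) for p in panels)
--     # Pad panels to same height
--     padded = []
--     for p in panels:
--         while len(p) < height:
--             p = p + [""]
--         padded.append(p)
--     result = []
--     for row in range(height):
--         result.append(sep.join(p[row] for p in padded))
--     return result
-- ===== SOURCE B (Python) =====
-- def hstack(panels: list[list[str]], sep: str = " ") -> list[str]:
--     """Horizontally stack equal-height panels."""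
--     out = []
--     row = 0
--     while any(row < len(p) for p in panels):
--         out.append(sep.join(p[row] if row < len(p) else "" for p in panels))
--         row += 1
--     return out
-- ===== Notes on version B (the rewrite author's own statement) =====
-- stated objective: simpler
-- what changed: Replaces the three-step height/pad/index pipeline with a single row-peeling loop that joins each row directly, substituting "" for exhausted panels on the fly (no padded copies, no precomputed height).
-- crash fix: On empty panels A's max() raises ValueError while B naturally returns []. — e.g. on hstack([], " "): A raises ValueError, B returns []
import Mathlib
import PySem

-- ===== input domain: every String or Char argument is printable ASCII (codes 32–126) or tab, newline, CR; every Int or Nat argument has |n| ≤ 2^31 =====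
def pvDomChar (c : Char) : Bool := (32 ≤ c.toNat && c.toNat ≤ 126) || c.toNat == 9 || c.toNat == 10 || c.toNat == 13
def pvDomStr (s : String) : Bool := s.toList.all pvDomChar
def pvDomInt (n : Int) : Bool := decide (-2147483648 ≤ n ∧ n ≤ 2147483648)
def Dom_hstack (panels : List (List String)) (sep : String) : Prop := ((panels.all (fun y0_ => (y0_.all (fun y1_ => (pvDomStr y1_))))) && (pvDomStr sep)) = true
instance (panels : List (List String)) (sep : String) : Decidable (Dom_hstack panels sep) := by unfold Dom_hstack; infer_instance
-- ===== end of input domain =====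

-- B replaces A's height/pad/index three-step with a single row-peeling loop (simpler); on empty
-- panels A raises ValueError (max of empty) while B returns [] — that input is outside Pre_.
-- Neither implementation mutates its arguments (A rebinds p, never mutates).

-- ===== PORT A =====
-- `while len(p) < height: p = p + [""]`
def hstackPad (p : List String) (height : Nat) : List String :=
  if p.length < height then hstackPad (p ++ [""]) height else p
termination_by height - p.length
decreasing_by simp_all; omega

def hstack (panels : List (List String)) (sep : String) : List String :=
  -- height = max(len(p) for p in panels); none (empty panels) is Python's ValueError, excluded by Pre_
  match PySem.List.max? (panels.map (fun p => p.length)) (fun y => y) with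
  | none => []
  | some height =>
    let padded := panels.map (fun p => hstackPad p height)
    -- p[row] is always in range here (len(padded p) ≥ height > row), so getD is exact
    (List.range height).map (fun row => PySem.Str.join sep (padded.map (fun p => p.getD row "")))

-- ===== PORT B =====
-- `while any(row < len(p) for p in panels): out.append(sep.join(p[row] if row < len(p) else "" for p in panels))`
def hstackAltLoop (panels : List (List String)) (sep : String) (row : Nat) : List String :=
  if panels.any (fun p => row < p.length) then
    PySem.Str.join sep (panels.map (fun p => if row < p.length then p.getD row "" else "")) ::
      hstackAltLoop panels sep (row + 1)
  else []
termination_by (panels.foldl (fun a p => max a p.length) 0) - row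
decreasing_by
  rename_i h
  simp only [List.any_eq_true, decide_eq_true_eq] at h
  obtain ⟨p, hp, hlt⟩ := h
  have := (PySem.List.le_foldl_max_nat panels (fun p => p.length) 0).2 p hp
  omega

def hstack_alt (panels : List (List String)) (sep : String) : List String :=
  hstackAltLoop panels sep 0

-- ===== PRECONDITION & SPEC =====
-- Pre_ excludes only panels = [], where A's max() raises ValueError (and B returns []).
def Pre_hstack (panels : List (List String)) (sep : String) : Prop := panels ≠ []
instance (panels : List (List String)) (sep : String) : Decidable (Pre_hstack panels sep) := by unfold Pre_hstack; infer_instance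
def pvWitness_hstack : List (List String) × String := ([["ab", "c"], ["xyz"]], " ")

-- On empty panels A raises ValueError (max() of an empty sequence) while B's loop naturally returns [].
def Raises_hstack (panels : List (List String)) (sep : String) : Prop := panels = []
instance (panels : List (List String)) (sep : String) : Decidable (Raises_hstack panels sep) := by unfold Raises_hstack; infer_instance
def pvRaiseWitness_hstack : List (List String) × String := ([], " ")
def pvRaiseWitnessOut_hstack : List String := []

def Spec_hstack (panels : List (List String)) (sep : String) (out : List String) : Prop := out = hstack_alt panels sep
instance (panels : List (List String)) (sep : String) (out : List String) : Decidable (Spec_hstack panels sep out) := by unfold Spec_hstack; infer_instance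

-- ===== CLAIM (what is proved, stated in full; the proofs are below) =====
def Claim_equal_hstack : Prop := ∀ (panels : List (List String)) (sep : String), Dom_hstack panels sep → Pre_hstack panels sep → Spec_hstack panels sep (hstack panels sep)
def Claim_raises_hstack : Prop := (∀ (panels : List (List String)) (sep : String), Dom_hstack panels sep → Raises_hstack panels sep → ¬ Pre_hstack panels sep) ∧ (Dom_hstack (pvRaiseWitness_hstack.1) (pvRaiseWitness_hstack.2) ∧ Raises_hstack (pvRaiseWitness_hstack.1) (pvRaiseWitness_hstack.2) ∧ hstack_alt (pvRaiseWitness_hstack.1) (pvRaiseWitness_hstack.2) = pvRaiseWitnessOut_hstack)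

-- ===== LEMMAS AND PROOFS =====

-- the row value both programs join, for each panel: its row-th cell or ""
def hstackCell (row : Nat) (p : List String) : String := p.getD row ""

lemma hstackPad_eq (p : List String) (height : Nat) :
    hstackPad p height = p ++ List.replicate (height - p.length) "" := by
  by_cases h : p.length < height
  · rw [hstackPad, if_pos h, hstackPad_eq (p ++ [""]) height]
    simp only [List.append_assoc]
    congr 1
    have : height - p.length = (height - (p ++ [""]).length) + 1 := by simp; omega
    rw [this, List.replicate_succ]
    rfl
  · rw [hstackPad, if_neg h]
    have : height - p.length = 0 := by omega
    simp [this]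
termination_by height - p.length
decreasing_by simp_all; omega

lemma getD_append_replicate (l : List String) (k row : Nat) :
    (l ++ List.replicate k "").getD row "" = l.getD row "" := by
  simp only [List.getD, List.getElem?_append]
  split
  · rfl
  · rw [List.getElem?_replicate]
    split <;> simp [List.getElem?_eq_none (by omega : l.length ≤ row)]

lemma foldl_max_le (t : List (List String)) (a row : Nat) (ha : a ≤ row)
    (h : ∀ p ∈ t, p.length ≤ row) : t.foldl (fun a p => max a p.length) a ≤ row := by
  induction t generalizing a with
  | nil => simpa
  | cons q s ih =>
    exact ih (max a q.length) (by have := h q (by simp); omega)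
      (fun p hp => h p (by simp [hp]))

-- the condition of B's while loop is exactly "row below the running max of the lengths"
lemma any_lt_iff (panels : List (List String)) (row : Nat) :
    (panels.any (fun p => row < p.length) = true) ↔
      row < panels.foldl (fun a p => max a p.length) 0 := by
  constructor
  · intro h
    simp only [List.any_eq_true, decide_eq_true_eq] at h
    obtain ⟨p, hp, hlt⟩ := h
    have := (PySem.List.le_foldl_max_nat panels (fun p => p.length) 0).2 p hp
    omega
  · intro h
    by_contra hc
    simp only [List.any_eq_true, decide_eq_true_eq, not_exists, not_and, not_lt] at hc
    have := foldl_max_le panels 0 row (by omega) hc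
    omega

-- the if-expression B joins is just getD (out-of-range getD is the default "")
lemma cell_if_eq (row : Nat) (p : List String) :
    (if row < p.length then p.getD row "" else "") = hstackCell row p := by
  unfold hstackCell
  split
  · rfl
  · rw [List.getD_eq_default]
    omega

-- B's loop lists the rows r, r+1, …, up to the max length
lemma hstackAltLoop_eq (panels : List (List String)) (sep : String) (r : Nat) :
    hstackAltLoop panels sep r =
      (List.range' r (panels.foldl (fun a p => max a p.length) 0 - r)).map
        (fun row => PySem.Str.join sep (panels.map (hstackCell row))) := by
  rw [hstackAltLoop]
  by_cases h : panels.any (fun p => r < p.length) = true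
  · rw [if_pos h]
    have hr := (any_lt_iff panels r).1 h
    rw [hstackAltLoop_eq panels sep (r + 1)]
    have hs : panels.foldl (fun a p => max a p.length) 0 - r
        = (panels.foldl (fun a p => max a p.length) 0 - (r + 1)) + 1 := by omega
    rw [hs, List.range'_succ, List.map_cons]
    congr 1
    congr 1
    exact List.map_congr_left (fun p _ => cell_if_eq r p)
  · rw [if_neg h]
    have hr : ¬ r < panels.foldl (fun a p => max a p.length) 0 :=
      fun hlt => h ((any_lt_iff panels r).2 hlt)
    have : panels.foldl (fun a p => max a p.length) 0 - r = 0 := by omega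
    simp [this]
termination_by (panels.foldl (fun a p => max a p.length) 0) - r
decreasing_by
  have := (any_lt_iff panels r).1 h
  omega

theorem hstack_spec : Claim_equal_hstack := by
  intro panels sep _ hpre
  obtain ⟨q, t, rfl⟩ := List.exists_cons_of_ne_nil hpre
  unfold Spec_hstack hstack hstack_alt
  have hmax : PySem.List.max? ((q :: t).map (fun p => p.length)) (fun y => y)
      = some ((q :: t).foldl (fun a p => max a p.length) 0) := by
    rw [List.map_cons, PySem.List.max?_id_cons]
    congr 1
    rw [List.foldl_map, List.foldl_cons, Nat.zero_max]
  rw [hmax]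
  rw [hstackAltLoop_eq, Nat.sub_zero, ← List.range_eq_range']
  refine List.map_congr_left (fun row _ => ?_)
  congr 1
  rw [List.map_map]
  refine List.map_congr_left (fun p _ => ?_)
  show (hstackPad p _).getD row "" = hstackCell row p
  rw [hstackPad_eq, getD_append_replicate]
  rfl

theorem hstack_raises : Claim_raises_hstack := by
  unfold Claim_raises_hstack
  refine ⟨fun panels sep _ hr hp => hp hr, by decide, rfl, ?_⟩
  show hstack_alt [] " " = []
  rw [hstack_alt, hstackAltLoop]
  simp

-- self-check: the raise witness's B-value, read off the claim
theorem hstack_raises_witness :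
    hstack_alt pvRaiseWitness_hstack.1 pvRaiseWitness_hstack.2 = pvRaiseWitnessOut_hstack :=
  hstack_raises.2.2.2
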